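-- pv_equiv track=rewrite | github.com/Lev-Excellenteam-2023/google-autocomplete-team-8 | autoComplete/main.py | is_almost_anagram
-- ===== SOURCE A (Python) =====
-- from collections import Counter
--
-- def is_almost_anagram(sentence1: str, sentence2: str) -> bool:
--     sentence1 = sentence1.replace(" ", "").lower()
--     sentence2 = sentence2.replace(" ", "").lower()
--
--     count1 = Counter(sentence1)
--     count2 = Counter(sentence2)
--
--     missing_letters = 0
--     for char, count in count1.items():
--         if count2[char] < count:
--             missing_letters += count - count2[char]
--         if missing_letters > 1:
--             return False
--
--     return True
-- ===== SOURCE B (Python) =====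
-- def is_almost_anagram(sentence1: str, sentence2: str) -> bool:
--     t1 = sorted(sentence1.replace(" ", "").lower())
--     t2 = sorted(sentence2.replace(" ", "").lower())
--     missing = 0
--     i = j = 0
--     while i < len(t1):
--         if j < len(t2) and t2[j] < t1[i]:
--             j += 1
--         elif j < len(t2) and t2[j] == t1[i]:
--             i += 1
--             j += 1
--         else:
--             missing += 1
--             if missing > 1:
--                 return False
--             i += 1
--     return True
-- ===== Notes on version B (the rewrite author's own statement) =====
-- stated objective: alternative
-- what changed: Replaced the two Counter hash tables and the loop over count1.items() with sorting both normalized strings and a two-pointer merge that counts characters of sentence1 unmatched in sentence2, early-exiting once the deficit exceeds 1.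
import Mathlib
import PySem

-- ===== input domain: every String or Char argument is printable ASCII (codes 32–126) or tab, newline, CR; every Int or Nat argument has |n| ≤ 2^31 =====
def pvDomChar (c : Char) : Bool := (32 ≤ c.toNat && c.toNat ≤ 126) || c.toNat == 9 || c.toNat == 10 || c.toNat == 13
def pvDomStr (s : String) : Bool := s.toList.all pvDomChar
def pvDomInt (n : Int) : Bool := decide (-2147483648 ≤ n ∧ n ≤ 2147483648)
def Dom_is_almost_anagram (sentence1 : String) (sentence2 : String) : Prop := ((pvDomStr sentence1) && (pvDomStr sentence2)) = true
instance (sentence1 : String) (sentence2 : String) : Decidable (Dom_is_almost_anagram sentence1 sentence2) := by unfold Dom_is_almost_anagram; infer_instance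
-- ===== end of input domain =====

-- B replaces A's Counter hash tables by sorting both normalized strings and a two-pointer
-- merge that tallies unmatched sentence1 characters (alternative algorithm, same cost class).


-- ===== PORT A =====
-- the 'for char, count in count1.items()' loop with its early 'return False'
def pvALoop : List (Char × Int) → PySem.Dict Char Int → Int → Bool
  | [], _, _ => true
  | (ch, cnt) :: rest, count2, missing =>
      let missing' := if count2.getD ch 0 < cnt then missing + (cnt - count2.getD ch 0) else missing
      if missing' > 1 then false else pvALoop rest count2 missing'

def is_almost_anagram (sentence1 : String) (sentence2 : String) : Bool :=
  pvALoop (PySem.Dict.counter (PySem.Str.lower (PySem.Str.replace sentence1 " " "")).toList).items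
    (PySem.Dict.counter (PySem.Str.lower (PySem.Str.replace sentence2 " " "")).toList) 0

-- ===== PORT B =====
-- the 'while i < len(t1)' two-pointer merge with its early 'return False'
def pvBLoop : List Char → List Char → Int → Bool
  | [], _, _ => true
  | a :: xs, b :: ys, missing =>
      if b < a then pvBLoop (a :: xs) ys missing
      else if b = a then pvBLoop xs ys missing
      else if missing + 1 > 1 then false else pvBLoop xs (b :: ys) (missing + 1)
  | _ :: xs, [], missing =>
      if missing + 1 > 1 then false else pvBLoop xs [] (missing + 1)
termination_by l1 l2 _ => l1.length + l2.length

def is_almost_anagram_alt (sentence1 : String) (sentence2 : String) : Bool :=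
  pvBLoop (PySem.List.sorted (PySem.Str.lower (PySem.Str.replace sentence1 " " "")).toList (fun x => x) false)
    (PySem.List.sorted (PySem.Str.lower (PySem.Str.replace sentence2 " " "")).toList (fun x => x) false) 0

-- ===== PRECONDITION & SPEC =====
def Spec_is_almost_anagram (sentence1 : String) (sentence2 : String) (out : Bool) : Prop := out = is_almost_anagram_alt sentence1 sentence2
instance (sentence1 : String) (sentence2 : String) (out : Bool) : Decidable (Spec_is_almost_anagram sentence1 sentence2 out) := by unfold Spec_is_almost_anagram; infer_instance

-- ===== CLAIM (what is proved, stated in full; the proofs are below) =====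
def Claim_equal_is_almost_anagram : Prop := ∀ (sentence1 : String) (sentence2 : String), Dom_is_almost_anagram sentence1 sentence2 → Spec_is_almost_anagram sentence1 sentence2 (is_almost_anagram sentence1 sentence2)

-- ===== LEMMAS AND PROOFS =====

-- a ∉ t → (a ::ₘ s) - t = a ::ₘ (s - t)
theorem pv_cons_sub_of_notMem {α : Type} [DecidableEq α] (a : α) (s t : Multiset α)
    (h : a ∉ t) : (a ::ₘ s) - t = a ::ₘ (s - t) := by
  ext x
  by_cases hx : x = a
  · subst hx
    have ht : t.count x = 0 := Multiset.count_eq_zero_of_notMem h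
    simp [Multiset.count_sub, Multiset.count_cons_self, ht]
  · simp [Multiset.count_sub, Multiset.count_cons_of_ne hx]

-- b ∉ s → s - (b ::ₘ t) = s - t
theorem pv_sub_cons_of_notMem {α : Type} [DecidableEq α] (b : α) (s t : Multiset α)
    (h : b ∉ s) : s - (b ::ₘ t) = s - t := by
  rw [Multiset.sub_cons, Multiset.erase_of_notMem h]

-- A's items loop returns true iff missing plus the total (nonnegative) deficit stays ≤ 1
theorem pvALoop_eq (l1 l2 : List Char) (ks : List Char) (m : Int) (hm : m ≤ 1) :
    pvALoop (ks.map (fun k => (k, (l1.count k : Int)))) (PySem.Dict.counter l2) m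
      = decide (m + ((ks.map (fun k => ((l1.count k - l2.count k : ℕ) : Int))).sum) ≤ 1) := by
  induction ks generalizing m with
  | nil => simp [pvALoop, hm]
  | cons k ks ih =>
      simp only [List.map_cons, pvALoop, List.sum_cons]
      rw [PySem.Dict.getD_counter]
      have hterm : (if ((l2.count k : Int)) < (l1.count k : Int)
          then m + ((l1.count k : Int) - (l2.count k : Int)) else m)
          = m + ((l1.count k - l2.count k : ℕ) : Int) := by
        split_ifs with h <;> omega
      rw [hterm]
      have hs : 0 ≤ (ks.map (fun k => ((l1.count k - l2.count k : ℕ) : Int))).sum := by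
        apply List.sum_nonneg; intro x hx
        simp only [List.mem_map] at hx
        obtain ⟨y, _, rfl⟩ := hx; positivity
      by_cases hbig : m + ((l1.count k - l2.count k : ℕ) : Int) > 1
      · rw [if_pos hbig]
        have hng : ¬ (m + (((l1.count k - l2.count k : ℕ) : Int)
            + (ks.map (fun k => ((l1.count k - l2.count k : ℕ) : Int))).sum) ≤ 1) := by omega
        exact (decide_eq_false hng).symm
      · rw [if_neg hbig, ih _ (by omega), add_assoc]
        rfl

-- the deficit sum over the distinct characters of l1 is the card of the multiset difference
theorem pv_sum_eq_card (l1 l2 : List Char) :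
    (((PySem.Set.ofList l1).map (fun k => l1.count k - l2.count k)).sum)
      = ((↑l1 : Multiset Char) - (↑l2 : Multiset Char)).card := by
  have hsub : ((↑l1 : Multiset Char) - ↑l2).toFinset ⊆ l1.toFinset := by
    intro x hx
    simp only [Multiset.mem_toFinset] at hx
    have := Multiset.mem_of_le (Multiset.sub_le_self _ _) hx
    simpa using this
  have h1 : ((↑l1 : Multiset Char) - (↑l2 : Multiset Char)).card
      = ∑ x ∈ ((↑l1 : Multiset Char) - ↑l2).toFinset, ((↑l1 : Multiset Char) - ↑l2).count x :=
    (Multiset.toFinset_sum_count_eq _).symm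
  have h2 : ∑ x ∈ ((↑l1 : Multiset Char) - ↑l2).toFinset, ((↑l1 : Multiset Char) - ↑l2).count x
      = ∑ x ∈ l1.toFinset, ((↑l1 : Multiset Char) - ↑l2).count x := by
    apply Finset.sum_subset hsub
    intro x _ hx
    simp only [Multiset.mem_toFinset] at hx
    exact Multiset.count_eq_zero_of_notMem hx
  have h3 : ∀ x, ((↑l1 : Multiset Char) - ↑l2).count x = l1.count x - l2.count x := by
    intro x; rw [Multiset.count_sub, Multiset.coe_count, Multiset.coe_count]
  have h4 : ((PySem.Set.ofList l1 : List Char).toFinset) = l1.toFinset := by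
    ext x; simp [PySem.Set.mem_ofList]
  calc ((PySem.Set.ofList l1).map (fun k => l1.count k - l2.count k)).sum
      = ∑ x ∈ (PySem.Set.ofList l1 : List Char).toFinset, (l1.count x - l2.count x) :=
        (List.sum_toFinset _ (PySem.Set.nodup_ofList l1)).symm
    _ = ∑ x ∈ l1.toFinset, (l1.count x - l2.count x) := by rw [h4]
    _ = ∑ x ∈ l1.toFinset, ((↑l1 : Multiset Char) - ↑l2).count x := by
        apply Finset.sum_congr rfl; intro x _; rw [h3]
    _ = ((↑l1 : Multiset Char) - (↑l2 : Multiset Char)).card := by rw [← h2, ← h1]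

-- B's merge loop returns true iff missing plus the card of the multiset difference stays ≤ 1
theorem pvBLoop_eq (l1 l2 : List Char) (m : Int)
    (h1 : l1.Pairwise (· ≤ ·)) (h2 : l2.Pairwise (· ≤ ·)) (hm : m ≤ 1) :
    pvBLoop l1 l2 m = decide (m + (((↑l1 : Multiset Char) - ↑l2).card : Int) ≤ 1) := by
  induction hn : l1.length + l2.length using Nat.strong_induction_on generalizing l1 l2 m with
  | _ n ih =>
  match l1, l2 with
  | [], t => simp [pvBLoop, hm]
  | a :: xs, [] =>
      have hx := (List.pairwise_cons.mp h1).2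
      have hcard : (((a :: xs : List Char) : Multiset Char) - (([] : List Char) : Multiset Char)).card
          = xs.length + 1 := by simp
      rw [pvBLoop, hcard]
      by_cases hbig : m + 1 > 1
      · rw [if_pos hbig]
        exact (decide_eq_false (by push_cast; omega)).symm
      · rw [if_neg hbig]
        rw [ih (xs.length + 0) (by simp only [List.length_cons, List.length_nil] at hn; omega) xs [] (m+1) hx List.Pairwise.nil (by omega) rfl]
        simp only [Multiset.coe_nil, Multiset.sub_zero, Multiset.coe_card]
        rw [decide_eq_decide]
        push_cast
        constructor <;> omega
  | a :: xs, b :: ys =>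
      have hx := List.pairwise_cons.mp h1
      have hy := List.pairwise_cons.mp h2
      rw [pvBLoop]
      by_cases hba : b < a
      · have hbn : b ∉ (a :: xs) := by
          intro hmem
          rcases List.mem_cons.mp hmem with rfl | hmm
          · exact lt_irrefl _ hba
          · exact absurd (hx.1 b hmm) (not_le.mpr hba)
        have hms : ((a :: xs : List Char) : Multiset Char) - ↑(b :: ys)
            = ((a :: xs : List Char) : Multiset Char) - ↑ys := by
          rw [show ((b :: ys : List Char) : Multiset Char) = b ::ₘ (↑ys : Multiset Char) from rfl]
          exact pv_sub_cons_of_notMem b _ _ (by simpa using hbn)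
        rw [if_pos hba, hms]
        exact ih (xs.length + 1 + ys.length) (by simp only [List.length_cons] at hn; omega) (a :: xs) ys m h1 hy.2 hm rfl
      · rw [if_neg hba]
        by_cases heq : b = a
        · subst heq
          have hms : ((b :: xs : List Char) : Multiset Char) - ↑(b :: ys)
              = (↑xs : Multiset Char) - ↑ys := by
            rw [show ((b :: xs : List Char) : Multiset Char) = b ::ₘ (↑xs : Multiset Char) from rfl,
                show ((b :: ys : List Char) : Multiset Char) = b ::ₘ (↑ys : Multiset Char) from rfl,
                Multiset.sub_cons, Multiset.erase_cons_head]
          rw [if_pos rfl, hms]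
          exact ih (xs.length + ys.length) (by simp only [List.length_cons] at hn; omega) xs ys m hx.2 hy.2 hm rfl
        · rw [if_neg heq]
          have hab : a < b := lt_of_le_of_ne (not_lt.mp hba) (Ne.symm heq)
          have han : a ∉ (b :: ys) := by
            intro hmem
            rcases List.mem_cons.mp hmem with rfl | hmm
            · exact lt_irrefl _ hab
            · exact absurd (hy.1 a hmm) (not_le.mpr hab)
          have hcons : ((a :: xs : List Char) : Multiset Char) - ↑(b :: ys)
              = a ::ₘ ((↑xs : Multiset Char) - ↑(b :: ys)) := by
            rw [show ((a :: xs : List Char) : Multiset Char) = a ::ₘ (↑xs : Multiset Char) from rfl]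
            exact pv_cons_sub_of_notMem a _ _ (by simpa using han)
          rw [hcons]
          by_cases hbig : m + 1 > 1
          · rw [if_pos hbig]
            refine (decide_eq_false ?_).symm
            rw [Multiset.card_cons]
            push_cast
            omega
          · rw [if_neg hbig]
            rw [ih (xs.length + (ys.length + 1)) (by simp only [List.length_cons] at hn; omega) xs (b :: ys) (m+1) hx.2 h2 (by omega) rfl]
            rw [Multiset.card_cons]
            rw [decide_eq_decide]
            push_cast
            constructor <;> omega

-- ===== VERDICT (by name: the statement is the Claim_ definition above) =====
theorem is_almost_anagram_spec : Claim_equal_is_almost_anagram := by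
  intro s1 s2 _
  unfold Spec_is_almost_anagram is_almost_anagram is_almost_anagram_alt
  set l1 := (PySem.Str.lower (PySem.Str.replace s1 " " "")).toList with hl1
  set l2 := (PySem.Str.lower (PySem.Str.replace s2 " " "")).toList with hl2
  set t1 := PySem.List.sorted l1 (fun x => x) false with ht1
  set t2 := PySem.List.sorted l2 (fun x => x) false with ht2
  have hperm1 : t1.Perm l1 := PySem.List.sorted_perm l1 (fun x => x) false
  have hperm2 : t2.Perm l2 := PySem.List.sorted_perm l2 (fun x => x) false
  have hmul1 : (↑t1 : Multiset Char) = ↑l1 := Multiset.coe_eq_coe.mpr hperm1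
  have hmul2 : (↑t2 : Multiset Char) = ↑l2 := Multiset.coe_eq_coe.mpr hperm2
  have hp1 : t1.Pairwise (· ≤ ·) := by
    have := PySem.List.sorted_pairwise l1 (fun x => x)
    simpa using this
  have hp2 : t2.Pairwise (· ≤ ·) := by
    have := PySem.List.sorted_pairwise l2 (fun x => x)
    simpa using this
  rw [pvBLoop_eq t1 t2 0 hp1 hp2 (by norm_num), hmul1, hmul2]
  rw [show (PySem.Dict.counter l1).items
      = (PySem.Set.ofList l1).map (fun k => (k, (l1.count k : Int))) from PySem.Dict.items_counter l1]
  rw [pvALoop_eq l1 l2 (PySem.Set.ofList l1) 0 (by norm_num)]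
  have hsum : ((PySem.Set.ofList l1).map (fun k => ((l1.count k - l2.count k : ℕ) : Int))).sum
      = ((((PySem.Set.ofList l1).map (fun k => l1.count k - l2.count k)).sum : ℕ) : Int) := by
    rw [Nat.cast_list_sum, List.map_map]
    rfl
  rw [hsum, pv_sum_eq_card l1 l2]
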